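-- pv_equiv track=rewrite | github.com/Wider-Community/quranic-universal-audio | scripts/request_helpers.py | add_to_processed
-- ===== SOURCE A (Python) =====
-- def add_to_processed(md_text, reciter_name, coverage="114 surahs, 6236 ayahs"):
--     """Add a reciter to the Processed Reciters table.
--
--     Deprecated: RECITERS.md is now fully auto-generated by list_reciters.py --write.
--     Kept for audit_reciters.py compatibility.
--     """
--     lines = md_text.split("\n")
--     result = []
--     inserted = False
--
--     for i, line in enumerate(lines):
--         result.append(line)
--         # Insert after the last row of the processed table (before the --- separator)
--         if not inserted and line.startswith("|") and "| Reciter" not in line and "|---" not in line: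
--             # Check if next line is not a table row (end of processed table)
--             next_line = lines[i + 1] if i + 1 < len(lines) else ""
--             if not next_line.startswith("|"):
--                 new_row = f"| {reciter_name} | {coverage} | ✓ | ✗ | ✗ |"
--                 result.append(new_row)
--                 inserted = True
--
--     return "\n".join(result)
-- ===== SOURCE B (Python) =====
-- def add_to_processed(md_text, reciter_name, coverage="114 surahs, 6236 ayahs"):
--     """Locate-then-splice rewrite: find the insertion index, then slice the list."""
--     lines = md_text.split("\n")
--     idx = None
--     for i, (line, nxt) in enumerate(zip(lines, lines[1:] + [""])):
--         if (line.startswith("|") and "| Reciter" not in line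
--                 and "|---" not in line and not nxt.startswith("|")):
--             idx = i
--             break
--     if idx is None:
--         return "\n".join(lines)
--     new_row = f"| {reciter_name} | {coverage} | ✓ | ✗ | ✗ |"
--     return "\n".join(lines[:idx + 1] + [new_row] + lines[idx + 1:])
-- ===== Notes on version B (the rewrite author's own statement) =====
-- stated objective: simpler
-- what changed: Replaces the append-every-line loop with an inserted flag by a two-phase locate-then-splice: find the first qualifying line index (stopping early), then rebuild via list slices.
import Mathlib
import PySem

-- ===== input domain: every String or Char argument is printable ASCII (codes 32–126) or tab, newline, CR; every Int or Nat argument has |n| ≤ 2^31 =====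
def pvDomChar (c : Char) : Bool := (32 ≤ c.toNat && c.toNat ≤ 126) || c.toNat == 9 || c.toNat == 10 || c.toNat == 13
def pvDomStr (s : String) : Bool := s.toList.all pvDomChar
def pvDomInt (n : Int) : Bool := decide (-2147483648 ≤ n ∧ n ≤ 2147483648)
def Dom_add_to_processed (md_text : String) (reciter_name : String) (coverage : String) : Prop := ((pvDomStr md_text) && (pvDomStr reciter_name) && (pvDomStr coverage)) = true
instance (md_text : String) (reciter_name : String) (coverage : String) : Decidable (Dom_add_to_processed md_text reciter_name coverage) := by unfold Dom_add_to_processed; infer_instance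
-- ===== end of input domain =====

-- B replaces A's append-every-line loop (with an inserted flag) by locate-the-index-then-splice; objective: simpler.


-- shared helpers (the identical Python expressions occur in A and in B):
-- f"| {reciter_name} | {coverage} | ✓ | ✗ | ✗ |"  (plain concatenation, exact on code points)
def pvRow (reciter_name : String) (coverage : String) : String :=
  String.ofList ("| ".toList ++ reciter_name.toList ++ " | ".toList ++ coverage.toList ++ " | ✓ | ✗ | ✗ |".toList)
-- line.startswith("|") and "| Reciter" not in line and "|---" not in line
def pvQual (line : String) : Bool :=
  PySem.Str.startswith line "|" && !PySem.Str.isIn "| Reciter" line && !PySem.Str.isIn "|---" line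
-- s.startswith("|")
def pvIsRow (s : String) : Bool := PySem.Str.startswith s "|"

-- ===== PORT A =====
-- A's loop body over (i, line): append the line; if not yet inserted, the line qualifies and lines[i+1] (or "") is not a table row, append the new row and set inserted.
def pvStepA (lines : List String) (row : String) (st : List String × Bool) (p : Int × String) : List String × Bool :=
  let result := st.1 ++ [p.2]
  if !st.2 && pvQual p.2 then
    let next_line := if p.1 + 1 < (lines.length : Int) then PySem.List.pyGetD lines (p.1 + 1) "" else ""
    if !pvIsRow next_line then (result ++ [row], true)
    else (result, st.2)
  else (result, st.2)

def add_to_processed (md_text : String) (reciter_name : String) (coverage : String) : String :=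
  let lines := (PySem.Str.split? md_text "\n").getD []
  let fin := (PySem.List.enumerate lines 0).foldl (pvStepA lines (pvRow reciter_name coverage)) ([], false)
  PySem.Str.join "\n" fin.1

-- ===== PORT B =====
-- first index whose line qualifies and whose successor (or "" at the end) is not a table row
def pvFindIns : List String → Option Nat
  | [] => none
  | l :: rest =>
    if pvQual l && !pvIsRow (rest.headD "") then some 0
    else (pvFindIns rest).map (· + 1)

def add_to_processed_alt (md_text : String) (reciter_name : String) (coverage : String) : String :=
  let lines := (PySem.Str.split? md_text "\n").getD []
  match pvFindIns lines with
  | none => PySem.Str.join "\n" lines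
  | some i => PySem.Str.join "\n" (lines.take (i + 1) ++ [pvRow reciter_name coverage] ++ lines.drop (i + 1))

-- ===== PRECONDITION & SPEC =====
def Spec_add_to_processed (md_text : String) (reciter_name : String) (coverage : String) (out : String) : Prop := out = add_to_processed_alt md_text reciter_name coverage
instance (md_text : String) (reciter_name : String) (coverage : String) (out : String) : Decidable (Spec_add_to_processed md_text reciter_name coverage out) := by unfold Spec_add_to_processed; infer_instance

-- ===== CLAIM (what is proved, stated in full; the proofs are below) =====
def Claim_equal_add_to_processed : Prop := ∀ (md_text : String) (reciter_name : String) (coverage : String), Dom_add_to_processed md_text reciter_name coverage → Spec_add_to_processed md_text reciter_name coverage (add_to_processed md_text reciter_name coverage)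

-- ===== LEMMAS AND PROOFS =====

-- once inserted, A's loop only appends the remaining lines
theorem pvStepA_inserted (lines : List String) (row : String) :
    ∀ (suf : List String) (acc : List String) (n : Int),
      (PySem.List.enumerate suf n).foldl (pvStepA lines row) (acc, true) = (acc ++ suf, true) := by
  intro suf
  induction suf with
  | nil => intro acc n; simp [PySem.List.enumerate_nil]
  | cons l rest ih =>
    intro acc n
    rw [PySem.List.enumerate_cons, List.foldl_cons]
    have hstep : pvStepA lines row (acc, true) (n, l) = (acc ++ [l], true) := by
      simp [pvStepA]
    rw [hstep, ih (acc ++ [l]) (n + 1)]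
    simp

-- main invariant: running A's loop (not yet inserted) over the suffix of lines starting at n equals B's locate-then-splice on that suffix
theorem pvMain (lines : List String) (row : String) :
    ∀ (suf : List String) (n : Nat) (acc : List String), lines.drop n = suf →
      (PySem.List.enumerate suf (n : Int)).foldl (pvStepA lines row) (acc, false)
        = (match pvFindIns suf with
           | none => (acc ++ suf, false)
           | some j => (acc ++ (suf.take (j + 1) ++ [row] ++ suf.drop (j + 1)), true)) := by
  intro suf
  induction suf with
  | nil => intro n acc _; simp [PySem.List.enumerate_nil, pvFindIns]
  | cons l rest ih =>
    intro n acc h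
    have hdrop : lines.drop (n + 1) = rest := by
      have := congrArg (List.drop 1) h
      simpa [List.drop_drop, Nat.add_comm] using this
    have hnext : (if ((n : Int) + 1) < (lines.length : Int) then PySem.List.pyGetD lines ((n : Int) + 1) "" else "")
        = rest.head?.getD "" := by
      rw [← List.headD_eq_head?_getD]
      have hc : ((n : Int) + 1) = ((n + 1 : Nat) : Int) := by push_cast; ring
      rw [hc, PySem.List.pyGetD_natCast]
      cases hr : rest with
      | nil =>
        have hlen : lines.length ≤ n + 1 :=
          List.drop_eq_nil_iff.mp (by rw [hdrop, hr])
        rw [if_neg (by exact_mod_cast Nat.not_lt.mpr hlen)]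
        simp
      | cons r rs =>
        have hget : lines[n + 1]? = some r := by
          rw [← List.head?_drop, hdrop, hr]; rfl
        have hlt : n + 1 < lines.length := (List.getElem?_eq_some_iff.mp hget).1
        rw [if_pos (by exact_mod_cast hlt)]
        simp [List.getD_eq_getElem?_getD, hget]
    rw [PySem.List.enumerate_cons, List.foldl_cons]
    have hcast : (n : Int) + 1 = ((n + 1 : Nat) : Int) := by push_cast; ring
    by_cases hc1 : pvQual l = true
    · by_cases hc2 : pvIsRow (rest.head?.getD "") = true
      · -- qualifies but next line is a table row: no insert, recurse
        have hstep : pvStepA lines row (acc, false) ((n : Int), l) = (acc ++ [l], false) := by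
          simp [pvStepA, hc1, hnext, hc2]
        rw [hstep, hcast, ih (n + 1) (acc ++ [l]) hdrop]
        rw [show pvFindIns (l :: rest) = (pvFindIns rest).map (· + 1) from by
          simp [pvFindIns, hc2]]
        cases hr : pvFindIns rest <;> simp
      · -- insert here
        have h2 : pvIsRow (rest.head?.getD "") = false := Bool.not_eq_true _ |>.mp hc2
        have hstep : pvStepA lines row (acc, false) ((n : Int), l) = (acc ++ [l] ++ [row], true) := by
          simp [pvStepA, hc1, hnext, h2]
        rw [hstep, pvStepA_inserted]
        rw [show pvFindIns (l :: rest) = some 0 from by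
          simp [pvFindIns, hc1, h2]]
        simp
    · -- line does not qualify: recurse
      have h1 : pvQual l = false := Bool.not_eq_true _ |>.mp hc1
      have hstep : pvStepA lines row (acc, false) ((n : Int), l) = (acc ++ [l], false) := by
        simp [pvStepA, h1]
      rw [hstep, hcast, ih (n + 1) (acc ++ [l]) hdrop]
      rw [show pvFindIns (l :: rest) = (pvFindIns rest).map (· + 1) from by
        simp [pvFindIns, h1]]
      cases hr : pvFindIns rest <;> simp

-- ===== VERDICT (by name: the statement is the Claim_ definition above) =====
theorem add_to_processed_spec : Claim_equal_add_to_processed := by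
  intro md r c _
  unfold Spec_add_to_processed
  simp only [add_to_processed, add_to_processed_alt]
  have h := pvMain ((PySem.Str.split? md "\n").getD []) (pvRow r c)
      ((PySem.Str.split? md "\n").getD []) 0 [] (by simp)
  simp only [Int.natCast_zero] at h
  rw [h]
  cases hf : pvFindIns ((PySem.Str.split? md "\n").getD []) <;> simp
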